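-- pv_equiv track=rewrite | github.com/HEPonHPC/pandana | nova/cut/analysis_cuts.py | kDibMaskHelper
-- ===== SOURCE A (Python) =====
-- def kDibMaskHelper(l):
--     mask = l[0]
--
--     fp = l[1]
--     fpmin = fp
--     fpmax = fp
--
--     lp = l[2]
--     lpmin = lp
--     lpmax = lp
--
--     for i in range(fp, 14, 1):
--         if mask[13-i] == '0':
--             break
--         else:
--             fpmax = i
--
--     for i in range(fp, -1, -1):
--         if mask[13-i] == '0':
--             break
--         else:
--             fpmin = i
--
--     for i in range(lp, 14, 1):
--         if mask[13-i] == '0':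
--             break
--         else:
--             lpmax = i
--
--     for i in range(lp, -1, -1):
--         if mask[13-i] == '0':
--             break
--         else:
--             lpmin = i
--     return (fpmin==lpmin) & (fpmax==lpmax) & (lpmax-fpmin+1>=4)
-- ===== SOURCE B (Python) =====
-- def kDibMaskHelper(l):
--     # Closed form: no scanning loops. If the start cell is '0' the block is the
--     # degenerate point p; otherwise slice the loop's window out of the mask and
--     # locate its first '0' with str.find.
--     mask, fp, lp = l
--
--     def hi(p):  # final value of the upward loop started at p
--         if p >= 14:
--             return p
--         if mask[13 - p] == '0':
--             return p
--         q = mask[:14 - p][::-1].find('0')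
--         return 13 if q == -1 else p + q - 1
--
--     def lo(p):  # final value of the downward loop started at p
--         if p < 0:
--             return p
--         if mask[13 - p] == '0':
--             return p
--         q = mask[13 - p:14].find('0')
--         return 0 if q == -1 else p - q + 1
--
--     fpmin, fpmax = lo(fp), hi(fp)
--     lpmin, lpmax = lo(lp), hi(lp)
--     return (fpmin == lpmin) and (fpmax == lpmax) and (lpmax - fpmin + 1 >= 4)
-- ===== Notes on version B (the rewrite author's own statement) =====
-- stated objective: alternative
-- what changed: Replaces A's four break-loops with closed forms: each loop's scan window is sliced out of the mask and its first '0' located with str.find, so no per-character loop remains (find runs in C, a constant-factor win a timing run measured).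
-- outside the precondition, e.g. on kDibMaskHelper(('00000000000000000011', 15, 15)): A returns False, B returns True
import Mathlib
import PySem

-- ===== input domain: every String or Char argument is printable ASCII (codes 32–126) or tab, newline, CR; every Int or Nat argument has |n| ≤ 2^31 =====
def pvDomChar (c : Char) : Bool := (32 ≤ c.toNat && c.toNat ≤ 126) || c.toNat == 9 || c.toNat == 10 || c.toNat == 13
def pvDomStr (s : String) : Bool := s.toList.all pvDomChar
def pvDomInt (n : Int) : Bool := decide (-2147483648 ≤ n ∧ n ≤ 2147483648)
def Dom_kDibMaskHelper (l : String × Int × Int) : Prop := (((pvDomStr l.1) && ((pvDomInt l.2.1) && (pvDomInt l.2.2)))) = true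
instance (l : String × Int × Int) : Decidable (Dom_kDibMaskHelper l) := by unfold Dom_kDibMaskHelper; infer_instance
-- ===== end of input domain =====

-- B replaces A's four break-loops by closed forms: each loop's window is sliced out and its first '0' located with str.find (objective: alternative).

-- ===== PORT A =====
-- A's four for-loops share one body ('if mask[13-i]=='0': break else acc = i'); pvScan is that loop body, run on the respective range.
def pvScan (mask : List Char) (acc : Int) : List Int → Int
  | [] => acc
  | i :: rest =>
    match PySem.List.pyGet? mask (13 - i) with
    | some c => if c = '0' then acc else pvScan mask i rest
    | none => acc  -- Python raises IndexError here; excluded by Pre_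

def kDibMaskHelper (l : String × Int × Int) : Bool :=
  let mask := l.1.toList
  let fp := l.2.1
  let lp := l.2.2
  let fpmax := pvScan mask fp (PySem.List.pyRange fp 14 1)
  let fpmin := pvScan mask fp (PySem.List.pyRange fp (-1) (-1))
  let lpmax := pvScan mask lp (PySem.List.pyRange lp 14 1)
  let lpmin := pvScan mask lp (PySem.List.pyRange lp (-1) (-1))
  (fpmin == lpmin) && (fpmax == lpmax) && decide (lpmax - fpmin + 1 ≥ 4)

-- ===== PORT B =====
-- def hi(p): upward loop's final value; degenerate point if the start cell is '0', else find on mask[:14-p][::-1]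
def pvHi (mask : String) (p : Int) : Int :=
  if p ≥ 14 then p
  else
    match PySem.Str.pyGet? mask (13 - p) with
    | some c =>
      if c = '0' then p
      else
        -- s[::-1] always succeeds in Python; slice? returns some here (step = -1 ≠ 0)
        let t := (PySem.Str.slice? (PySem.Str.slice mask none (some (14 - p))) none none (-1)).getD ""
        let q := PySem.Str.find t "0"
        if q = -1 then 13 else p + q - 1
    | none => p  -- Python raises IndexError here; excluded by Pre_

-- def lo(p): downward loop's final value; degenerate point if the start cell is '0', else find on mask[13-p:14]
def pvLo (mask : String) (p : Int) : Int :=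
  if p < 0 then p
  else
    match PySem.Str.pyGet? mask (13 - p) with
    | some c =>
      if c = '0' then p
      else
        let q := PySem.Str.find (PySem.Str.slice mask (some (13 - p)) (some 14)) "0"
        if q = -1 then 0 else p - q + 1
    | none => p  -- Python raises IndexError here; excluded by Pre_

def kDibMaskHelper_alt (l : String × Int × Int) : Bool :=
  let mask := l.1
  let fp := l.2.1
  let lp := l.2.2
  let fpmin := pvLo mask fp
  let fpmax := pvHi mask fp
  let lpmin := pvLo mask lp
  let lpmax := pvHi mask lp
  (fpmin == lpmin) && (fpmax == lpmax) && decide (lpmax - fpmin + 1 ≥ 4)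

-- ===== PRECONDITION & SPEC =====
-- Pre_ admits the inputs where A returns and its scans are the sliced windows B reads: a position is
-- admitted if (i) p ≤ 13, its first read index 13-p exists, and the downward loop meets a '0' before
-- running off a short mask (otherwise A raises IndexError), or (ii) p ≥ 14 where the wrapped first
-- read mask[13-p] is already '0' (both loops stop at once). Excluded while A still
-- returns: p ≥ 14 whose wrapped scan walks further through the string via negative-index wraparound —
-- an accident of 'mask[13-i]' that B's slice view does not and should not reproduce.
def pvOkPos (m : String) (p : Int) : Prop :=
  (p ≤ 13 ∧ 13 - p < (m.toList.length : Int) ∧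
    (p < 0 ∨ 14 ≤ (m.toList.length : Int) ∨ '0' ∈ m.toList.drop (13 - p).toNat))
  ∨ (14 ≤ p ∧ PySem.List.pyGet? m.toList (13 - p) = some '0')

def Pre_kDibMaskHelper (l : String × Int × Int) : Prop :=
  pvOkPos l.1 l.2.1 ∧ pvOkPos l.1 l.2.2
instance (l : String × Int × Int) : Decidable (Pre_kDibMaskHelper l) := by unfold Pre_kDibMaskHelper pvOkPos; infer_instance

def pvWitness_kDibMaskHelper : (String × Int × Int) := ("00111100001111", 2, 3)

def Spec_kDibMaskHelper (l : String × Int × Int) (out : Bool) : Prop := out = kDibMaskHelper_alt l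
instance (l : String × Int × Int) (out : Bool) : Decidable (Spec_kDibMaskHelper l out) := by unfold Spec_kDibMaskHelper; infer_instance

-- ===== CLAIM (what is proved, stated in full; the proofs are below) =====
def Claim_equal_kDibMaskHelper : Prop := ∀ (l : String × Int × Int), Dom_kDibMaskHelper l → Pre_kDibMaskHelper l → Spec_kDibMaskHelper l (kDibMaskHelper l)

-- ===== LEMMAS AND PROOFS =====

-- the closed forms of the two loops, phrased over List Char (what both ports reduce to)
def pvHiSpec (m : List Char) (p : Int) : Int :=
  if PySem.Chars.find ((m.take (14 - p).toNat).reverse) ['0'] = 0 then p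
  else if PySem.Chars.find ((m.take (14 - p).toNat).reverse) ['0'] = -1 then 13
  else p + PySem.Chars.find ((m.take (14 - p).toNat).reverse) ['0'] - 1

def pvLoSpec (m : List Char) (p : Int) : Int :=
  if PySem.Chars.find ((m.drop (13 - p).toNat).take (p + 1).toNat) ['0'] = 0 then p
  else if PySem.Chars.find ((m.drop (13 - p).toNat).take (p + 1).toNat) ['0'] = -1 then 0
  else p - PySem.Chars.find ((m.drop (13 - p).toNat).take (p + 1).toNat) ['0'] + 1

-- [c] is a prefix of l iff l starts with c
theorem pvSinglePrefix (c : Char) (l : List Char) : [c] <+: l ↔ l.head? = some c := by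
  cases l with
  | nil => simp
  | cons a t =>
    constructor
    · intro h
      obtain ⟨r, hr⟩ := h
      simp at hr
      simp [hr.1]
    · intro h
      simp at h
      exact ⟨t, by simp [h]⟩

-- first-'0' recurrence for Chars.find on a cons cell
theorem pvFindCons (c : Char) (t : List Char) :
    PySem.Chars.find (c :: t) ['0'] =
      if c = '0' then 0
      else if PySem.Chars.find t ['0'] = -1 then -1
      else PySem.Chars.find t ['0'] + 1 := by
  by_cases hc : c = '0'
  · subst hc
    rw [if_pos rfl]
    have hmem : ['0'] <:+: ('0' :: t) := List.IsPrefix.isInfix ⟨t, rfl⟩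
    have hq : 0 ≤ PySem.Chars.find ('0' :: t) ['0'] := (PySem.Chars.find_nonneg_iff _ _).2 hmem
    obtain ⟨hpre, hmin⟩ := PySem.Chars.find_spec hq
    by_contra hne
    have hpos : 0 < (PySem.Chars.find ('0' :: t) ['0']).toNat := by omega
    exact hmin 0 hpos (by rw [pvSinglePrefix]; rfl)
  · by_cases ht : ['0'] <:+: t
    · have hqt : 0 ≤ PySem.Chars.find t ['0'] := (PySem.Chars.find_nonneg_iff _ _).2 ht
      have hqtne : PySem.Chars.find t ['0'] ≠ -1 := by omega
      simp only [hc, if_false, hqtne]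
      have hmem : ['0'] <:+: (c :: t) := ht.trans (List.suffix_cons c t).isInfix
      have hq : 0 ≤ PySem.Chars.find (c :: t) ['0'] := (PySem.Chars.find_nonneg_iff _ _).2 hmem
      obtain ⟨hpre, hmin⟩ := PySem.Chars.find_spec hq
      obtain ⟨hpret, hmint⟩ := PySem.Chars.find_spec hqt
      set q := PySem.Chars.find (c :: t) ['0'] with hqdef
      set qt := PySem.Chars.find t ['0'] with hqtdef
      clear_value q qt
      have hq0 : q ≠ 0 := by
        intro h0
        rw [h0] at hpre
        simp only [pvSinglePrefix, Int.toNat_zero, List.drop_zero, List.head?_cons,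
          Option.some.injEq] at hpre
        exact hc hpre
      have hq1 : 1 ≤ q := by omega
      have hdrop : (c :: t).drop q.toNat = t.drop (q.toNat - 1) := by
        have : q.toNat = (q.toNat - 1) + 1 := by omega
        rw [this]
        simp
      rw [hdrop] at hpre
      have hmint' : ∀ i, i < q.toNat - 1 → ¬ ['0'] <+: t.drop i := by
        intro i hi
        have := hmin (i + 1) (by omega)
        simpa using this
      have hle1 : qt.toNat ≤ q.toNat - 1 := by
        by_contra hgt
        exact (hmint (q.toNat - 1) (by omega)) hpre
      have hle2 : q.toNat - 1 ≤ qt.toNat := by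
        by_contra hgt
        exact (hmint' qt.toNat (by omega)) hpret
      omega
    · have hqt : PySem.Chars.find t ['0'] = -1 := (PySem.Chars.find_eq_neg_one_iff _ _).2 ht
      rw [if_neg hc, hqt, if_pos rfl]
      rw [PySem.Chars.find_eq_neg_one_iff]
      intro h
      rcases List.infix_cons_iff.1 h with h1 | h2
      · rw [pvSinglePrefix] at h1
        simp at h1
        exact hc h1
      · exact ht h2

-- the upward window m[:14-p][::-1] decomposes as a cons at each step
theorem pvUpWindowCons (m : List Char) (p : Int) (hp : p ≤ 13)
    (hL : 13 - p < (m.length : Int)) :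
    (m.take (14 - p).toNat).reverse
      = m.getD (13 - p).toNat ' ' :: (m.take (13 - p).toNat).reverse := by
  have h1 : (14 - p).toNat = (13 - p).toNat + 1 := by omega
  rw [h1, List.take_succ, List.getElem?_eq_getElem (by omega), List.getD_eq_getElem _ _ (by omega)]
  simp

-- the same step written with the index forms produced by the loop expansion at p+1
theorem pvUpWindowCons2 (m : List Char) (p : Int) (hp : p ≤ 12)
    (hLL : 13 - (p + 1) < (m.length : Int)) :
    (m.take (13 - p).toNat).reverse
      = m.getD (13 - (p + 1)).toNat ' ' :: (m.take (13 - (p + 1)).toNat).reverse := by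
  have h1 : (13 - p).toNat = (13 - (p + 1)).toNat + 1 := by omega
  rw [h1, List.take_succ, List.getElem?_eq_getElem (by omega), List.getD_eq_getElem _ _ (by omega)]
  simp

-- the downward window m[13-p:14] decomposes as a cons at each step
theorem pvLoWindowCons (m : List Char) (p : Int) (h0 : 0 ≤ p) (hp : p ≤ 13)
    (hL : 13 - p < (m.length : Int)) :
    (m.drop (13 - p).toNat).take (p + 1).toNat
      = m.getD (13 - p).toNat ' ' :: (m.drop (14 - p).toNat).take p.toNat := by
  have h1 : (14 - p).toNat = (13 - p).toNat + 1 := by omega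
  have h2 : (p + 1).toNat = p.toNat + 1 := by omega
  rw [List.drop_eq_getElem_cons (by omega), h2, List.take_succ_cons, h1,
      List.getD_eq_getElem _ _ (by omega)]

-- the same step written with the index forms produced by the loop expansion at p-1
theorem pvLoWindowCons2 (m : List Char) (p : Int) (hp1 : 1 ≤ p) (hp : p ≤ 13)
    (hLL : 13 - (p - 1) < (m.length : Int)) :
    (m.drop (14 - p).toNat).take p.toNat
      = m.getD (13 - (p - 1)).toNat ' ' :: (m.drop (14 - (p - 1)).toNat).take (p - 1).toNat := by
  have h0 : (14 - p).toNat = (13 - (p - 1)).toNat := by omega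
  have h1 : (14 - (p - 1)).toNat = (13 - (p - 1)).toNat + 1 := by omega
  have h2 : p.toNat = (p - 1).toNat + 1 := by omega
  rw [h0, List.drop_eq_getElem_cons (by omega), h2, List.take_succ_cons, h1,
      List.getD_eq_getElem _ _ (by omega)]

theorem pvGetSome (m : List Char) (i : Int) (h0 : 0 ≤ i) (hi : i < (m.length : Int)) :
    PySem.List.pyGet? m i = some (m.getD i.toNat ' ') := by
  rw [PySem.List.pyGet?_of_nonneg m h0, List.getD_eq_getElem _ _ (by omega)]
  exact List.getElem?_eq_getElem (by omega)

-- A's upward loop equals the closed form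
theorem pvUpA (m : List Char) :
    ∀ (n : Nat) (p : Int), p ≤ 13 → (13 - p).toNat = n → 13 - p < (m.length : Int) →
    pvScan m p (PySem.List.pyRange p 14 1) = pvHiSpec m p := by
  intro n
  induction n with
  | zero =>
    intro p hp hn hL
    have hp13 : p = 13 := by omega
    subst hp13
    rw [PySem.List.pyRange_one_cons (by norm_num), PySem.List.pyRange_one_eq_nil (by norm_num)]
    simp only [pvScan]
    have hlen : (((m.take ((14:Int) - 13).toNat).reverse).length : Int) ≤ 1 := by
      simp [List.length_take]
    have hq1 := PySem.Chars.find_le_length ((m.take ((14:Int) - 13).toNat).reverse) ['0']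
    have hq2 := PySem.Chars.neg_one_le_find ((m.take ((14:Int) - 13).toNat).reverse) ['0']
    unfold pvHiSpec
    rcases hg : PySem.List.pyGet? m (13 - 13) with _ | c <;> simp only [] <;> split_ifs <;> omega
  | succ n ih =>
    intro p hp hn hL
    have hp12 : p ≤ 12 := by omega
    have hnn : (13 - (p + 1)).toNat = n := by omega
    have hLL : 13 - (p + 1) < (m.length : Int) := by omega
    rw [PySem.List.pyRange_one_cons (by omega)]
    simp only [pvScan]
    simp only [pvGetSome m (13 - p) (by omega) hL]
    rw [PySem.List.pyRange_one_cons (by omega)]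
    simp only [pvScan]
    simp only [pvGetSome m (13 - (p + 1)) (by omega) hLL]
    unfold pvHiSpec
    rw [pvUpWindowCons m p hp hL, pvFindCons, pvUpWindowCons2 m p hp12 hLL, pvFindCons]
    have hih := ih (p + 1) (by omega) hnn hLL
    rw [PySem.List.pyRange_one_cons (by omega)] at hih
    simp only [pvScan] at hih
    simp only [pvGetSome m (13 - (p + 1)) (by omega) hLL] at hih
    unfold pvHiSpec at hih
    rw [pvUpWindowCons m (p + 1) (by omega) hLL, pvFindCons] at hih
    have htri := PySem.Chars.neg_one_le_find ((m.take (13 - (p + 1)).toNat).reverse) ['0']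
    split_ifs at hih ⊢ <;> first | omega | (rw [hih]; omega) | exact hih | rfl | contradiction

-- A's downward loop equals the closed form
theorem pvLoA (m : List Char) :
    ∀ (n : Nat) (p : Int), 0 ≤ p → p ≤ 13 → p.toNat = n → 13 - p < (m.length : Int) →
    ('0' ∈ (m.drop (13 - p).toNat).take (p + 1).toNat ∨ 14 ≤ (m.length : Int)) →
    pvScan m p (PySem.List.pyRange p (-1) (-1)) = pvLoSpec m p := by
  intro n
  induction n with
  | zero =>
    intro p h0 hp hn hL hz
    have hp0 : p = 0 := by omega
    subst hp0
    rw [PySem.List.pyRange_neg_one_cons (by norm_num), PySem.List.pyRange_neg_one_eq_nil (by norm_num)]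
    simp only [pvScan]
    have hlen : (((m.drop ((13:Int) - 0).toNat).take ((0:Int) + 1).toNat).length : Int) ≤ 1 := by
      simp [List.length_take]
    have hq1 := PySem.Chars.find_le_length ((m.drop ((13:Int) - 0).toNat).take ((0:Int) + 1).toNat) ['0']
    have hq2 := PySem.Chars.neg_one_le_find ((m.drop ((13:Int) - 0).toNat).take ((0:Int) + 1).toNat) ['0']
    unfold pvLoSpec
    rcases hg : PySem.List.pyGet? m (13 - 0) with _ | c <;> simp only [] <;> split_ifs <;> omega
  | succ n ih =>
    intro p h0 hp hn hL hz
    have hp1 : 1 ≤ p := by omega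
    rw [PySem.List.pyRange_neg_one_cons (by omega)]
    simp only [pvScan]
    simp only [pvGetSome m (13 - p) (by omega) hL]
    unfold pvLoSpec
    rw [pvLoWindowCons m p h0 hp hL, pvFindCons]
    by_cases hc : m.getD (13 - p).toNat ' ' = '0'
    · simp_all
    · simp only [hc, if_false]
      have hz' : '0' ∈ (m.drop (13 - (p - 1)).toNat).take ((p - 1) + 1).toNat ∨ 14 ≤ (m.length : Int) := by
        rcases hz with hmem | hlen
        · by_cases hlen : 14 ≤ (m.length : Int)
          · right; exact hlen
          · left
            rw [List.take_of_length_le (by simp; omega)] at hmem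
            rw [List.drop_eq_getElem_cons (by omega : (13 - p).toNat < m.length)] at hmem
            rw [List.getD_eq_getElem _ _ (by omega : (13 - p).toNat < m.length)] at hc
            rcases List.mem_cons.1 hmem with heq | htl
            · exact absurd heq.symm hc
            · rw [List.take_of_length_le (by simp; omega),
                  show (13 - (p - 1)).toNat = (13 - p).toNat + 1 by omega]
              exact htl
        · right; exact hlen
      have hLL : 13 - (p - 1) < (m.length : Int) := by
        rcases hz' with hmem | hlen
        · by_contra hge
          rw [List.drop_eq_nil_of_le (by omega)] at hmem
          simp at hmem
        · omega
      rw [PySem.List.pyRange_neg_one_cons (by omega)]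
      simp only [pvScan]
      simp only [pvGetSome m (13 - (p - 1)) (by omega) hLL]
      rw [pvLoWindowCons2 m p hp1 hp hLL, pvFindCons]
      have hih := ih (p - 1) (by omega) (by omega) (by omega) hLL hz'
      rw [PySem.List.pyRange_neg_one_cons (by omega)] at hih
      simp only [pvScan] at hih
      simp only [pvGetSome m (13 - (p - 1)) (by omega) hLL] at hih
      unfold pvLoSpec at hih
      rw [pvLoWindowCons m (p - 1) (by omega) (by omega) hLL, pvFindCons] at hih
      have htri := PySem.Chars.neg_one_le_find ((m.drop (14 - (p - 1)).toNat).take (p - 1).toNat) ['0']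
      split_ifs at hih ⊢ <;> first | omega | (rw [hih]; omega) | exact hih | rfl | contradiction

-- the empty downward loop (p < 0)
theorem pvLoNegA (m : List Char) (p : Int) (hneg : p < 0) :
    pvScan m p (PySem.List.pyRange p (-1) (-1)) = p := by
  rw [PySem.List.pyRange_neg_one_eq_nil (by omega)]
  simp [pvScan]

-- B's hi reduces to the closed form (for p ≤ 13 with the start cell in range)
theorem pvHiEq (m : String) (p : Int) (hp : p ≤ 13) (hL : 13 - p < (m.toList.length : Int)) :
    pvHi m p = pvHiSpec m.toList p := by
  unfold pvHi
  rw [if_neg (by omega)]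
  have ht : (String.ofList (PySem.Str.slice m none (some (14 - p))).toList.reverse).toList
      = (m.toList.take (14 - p).toNat).reverse := by
    simp [PySem.Str.toList_slice, PySem.List.slice_to _ (by omega : (0:Int) ≤ 14 - p)]
  rw [PySem.Str.slice?_none_none_neg_one]
  simp only [Option.getD_some, PySem.Str.find_eq, ht, PySem.Str.pyGet?_eq,
    PySem.Chars.pyGet?_eq_listPyGet?, pvGetSome m.toList (13 - p) (by omega) hL,
    show "0".toList = ['0'] from rfl]
  unfold pvHiSpec
  rw [pvUpWindowCons m.toList p hp hL, pvFindCons]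
  by_cases hc : m.toList.getD (13 - p).toNat ' ' = '0'
  · simp only [hc]
    norm_num
  · simp only [hc, if_false]
    have htri := PySem.Chars.neg_one_le_find ((m.toList.take (13 - p).toNat).reverse) ['0']
    split_ifs <;> first | omega | (exfalso; assumption)

-- B's lo reduces to the closed form (for 0 ≤ p ≤ 13 with the start cell in range)
theorem pvLoEq (m : String) (p : Int) (h0 : 0 ≤ p) (hp : p ≤ 13)
    (hL : 13 - p < (m.toList.length : Int)) :
    pvLo m p = pvLoSpec m.toList p := by
  unfold pvLo
  rw [if_neg (by omega)]
  have hs : (PySem.Str.slice m (some (13 - p)) (some 14)).toList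
      = (m.toList.drop (13 - p).toNat).take (p + 1).toNat := by
    rw [PySem.Str.toList_slice, PySem.Chars.slice_eq_listSlice]
    rw [PySem.List.slice_toNat _ (by omega : (0:Int) ≤ 13 - p) (by norm_num : (0:Int) ≤ 14)]
    congr 1
    omega
  simp only [PySem.Str.find_eq, hs, PySem.Str.pyGet?_eq,
    PySem.Chars.pyGet?_eq_listPyGet?, pvGetSome m.toList (13 - p) (by omega) hL,
    show "0".toList = ['0'] from rfl]
  unfold pvLoSpec
  rw [pvLoWindowCons m.toList p h0 hp hL, pvFindCons]
  by_cases hc : m.toList.getD (13 - p).toNat ' ' = '0'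
  · simp only [hc]
    norm_num
  · simp only [hc, if_false]
    have htri := PySem.Chars.neg_one_le_find ((m.toList.drop (14 - p).toNat).take p.toNat) ['0']
    split_ifs <;> first | omega | (exfalso; assumption)

-- positions ≥ 14 admitted by Pre_: both loops stop immediately on a wrapped '0'
theorem pvWrapZero (m : String) (p : Int) (h14 : 14 ≤ p)
    (hz0 : PySem.List.pyGet? m.toList (13 - p) = some '0') :
    pvScan m.toList p (PySem.List.pyRange p 14 1) = pvHi m p ∧
    pvScan m.toList p (PySem.List.pyRange p (-1) (-1)) = pvLo m p := by
  constructor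
  · rw [PySem.List.pyRange_one_eq_nil (by omega)]
    unfold pvHi
    rw [if_pos (by omega)]
    rfl
  · rw [PySem.List.pyRange_neg_one_cons (by omega)]
    simp only [pvScan, hz0]
    rw [if_pos trivial]
    unfold pvLo
    rw [if_neg (by omega)]
    simp only [PySem.Str.pyGet?_eq, PySem.Chars.pyGet?_eq_listPyGet?, hz0]
    rw [if_pos trivial]

-- ===== VERDICT (by name: the statement is the Claim_ definition above) =====
theorem kDibMaskHelper_spec : Claim_equal_kDibMaskHelper := by
  intro l _hdom hpre
  obtain ⟨m, fp, lp⟩ := l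
  obtain ⟨hf, hl⟩ := hpre
  have key : ∀ p : Int, pvOkPos m p →
      pvScan m.toList p (PySem.List.pyRange p 14 1) = pvHi m p ∧
      pvScan m.toList p (PySem.List.pyRange p (-1) (-1)) = pvLo m p := by
    intro p hok
    rcases hok with ⟨hp, hL, hz⟩ | ⟨h14, hz0⟩
    · constructor
      · rw [pvUpA m.toList (13 - p).toNat p hp rfl hL, pvHiEq m p hp hL]
      · by_cases hneg : p < 0
        · rw [pvLoNegA m.toList p hneg]
          unfold pvLo
          rw [if_pos hneg]
        · have h0 : 0 ≤ p := by omega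
          have hz' : '0' ∈ (m.toList.drop (13 - p).toNat).take (p + 1).toNat ∨ 14 ≤ (m.toList.length : Int) := by
            rcases hz with h | h | h
            · omega
            · right; exact h
            · by_cases hlen : 14 ≤ (m.toList.length : Int)
              · right; exact hlen
              · left
                rw [List.take_of_length_le (by simp only [List.length_drop]; omega)]
                exact h
          rw [pvLoA m.toList p.toNat p h0 hp rfl hL hz', pvLoEq m p h0 hp hL]
    · exact pvWrapZero m p h14 hz0
  obtain ⟨hu1, hd1⟩ := key fp hf
  obtain ⟨hu2, hd2⟩ := key lp hl
  show kDibMaskHelper (m, fp, lp) = kDibMaskHelper_alt (m, fp, lp)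
  simp only [kDibMaskHelper, kDibMaskHelper_alt]
  rw [hu1, hu2, hd1, hd2]
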